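-- pv_equiv track=rewrite | github.com/glee1228/TIL | 인공지능실습/ch1/practice/submission.py | computeMaxWordLength1
-- ===== SOURCE A (Python) =====
-- def computeMaxWordLength1(text):
--     """
--     Given a string |text|, return the longest word in |text|.  If there are
--     ties, choose the word that comes latest in the alphabet.
--     A word is defined by a maximal sequence of characters without whitespaces.
--     You might find max() and list comprehensions handy here.
--     """
--     # BEGIN_YOUR_CODE
--     # raise NotImplementedError
--     words = text.split()
--     max_word = words[0]
--     for word in words:
--         if len(word) > len(max_word):
--             max_word = word
--         elif len(word) == len(max_word) and word > max_word:
--             max_word = word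
--     return max_word
-- ===== SOURCE B (Python) =====
-- def computeMaxWordLength1(text):
--     words = text.split()
--     return sorted(words, key=lambda w: (len(w), w))[-1]
-- ===== Notes on version B (the rewrite author's own statement) =====
-- stated objective: simpler
-- what changed: Replaces the running-max loop with manual length/tie comparisons by sorting the words on the key (len(w), w) and taking the last element.
import Mathlib
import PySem

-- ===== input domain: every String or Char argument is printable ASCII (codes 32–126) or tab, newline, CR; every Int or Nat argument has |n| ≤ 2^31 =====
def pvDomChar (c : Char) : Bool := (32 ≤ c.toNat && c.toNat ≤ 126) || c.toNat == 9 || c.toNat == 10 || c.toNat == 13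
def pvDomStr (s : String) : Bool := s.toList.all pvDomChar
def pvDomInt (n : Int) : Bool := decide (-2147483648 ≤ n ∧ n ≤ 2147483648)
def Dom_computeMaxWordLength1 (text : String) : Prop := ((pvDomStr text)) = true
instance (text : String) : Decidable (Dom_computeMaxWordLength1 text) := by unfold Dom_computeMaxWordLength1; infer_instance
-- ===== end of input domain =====

-- B sorts the words by (len(w), w) and takes the last element instead of A's running-max loop (objective: simpler).


-- ===== PORT A =====
def computeMaxWordLength1 (text : String) : String :=
  let words := PySem.Str.split₀ text
  match PySem.List.pyGet? words 0 with
  | none => ""          -- words[0] raises IndexError in Python; excluded by Pre_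
  | some w0 =>
    words.foldl (fun maxWord word =>
      if PySem.Str.len word > PySem.Str.len maxWord then word
      else if PySem.Str.len word = PySem.Str.len maxWord ∧ maxWord < word then word
      else maxWord) w0

-- ===== PORT B =====
def computeMaxWordLength1_alt (text : String) : String :=
  let words := PySem.Str.split₀ text
  match PySem.List.pyGet? (PySem.List.sorted2 words PySem.Str.len (fun w => w)) (-1) with
  | none => ""          -- sorted(words)[-1] raises IndexError in Python; excluded by Pre_
  | some w => w

-- ===== PRECONDITION & SPEC =====
-- Pre_ excludes exactly the inputs with no words (whitespace-only text), on which A raises IndexError.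
def Pre_computeMaxWordLength1 (text : String) : Prop := PySem.Str.split₀ text ≠ []
instance (text : String) : Decidable (Pre_computeMaxWordLength1 text) := by unfold Pre_computeMaxWordLength1; infer_instance
def pvWitness_computeMaxWordLength1 : String := "ab cd"
def Spec_computeMaxWordLength1 (text : String) (out : String) : Prop := out = computeMaxWordLength1_alt text
instance (text : String) (out : String) : Decidable (Spec_computeMaxWordLength1 text out) := by unfold Spec_computeMaxWordLength1; infer_instance

-- ===== CLAIM (what is proved, stated in full; the proofs are below) =====
def Claim_equal_computeMaxWordLength1 : Prop := ∀ (text : String), Dom_computeMaxWordLength1 text → Pre_computeMaxWordLength1 text → Spec_computeMaxWordLength1 text (computeMaxWordLength1 text)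

-- ===== LEMMAS AND PROOFS =====

-- the tuple key (len(w), w), in the lexicographic order
def pvKey (w : String) : Lex (Int × String) := toLex (PySem.Str.len w, w)

theorem pvKey_inj : Function.Injective pvKey := by
  intro a b h
  have := congrArg (fun p => (ofLex p).2) h
  simpa using this

theorem pvKey_lt (a b : String) :
    pvKey a < pvKey b ↔ (PySem.Str.len a < PySem.Str.len b ∨
      (¬ PySem.Str.len b < PySem.Str.len a ∧ a < b)) := by
  simp only [pvKey, Prod.Lex.toLex_lt_toLex]
  constructor
  · rintro (h | ⟨he, hs⟩)
    · exact Or.inl h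
    · exact Or.inr ⟨by omega, hs⟩
  · rintro (h | ⟨hn, hs⟩)
    · exact Or.inl h
    · rcases lt_trichotomy (PySem.Str.len a) (PySem.Str.len b) with h | h | h
      · exact Or.inl h
      · exact Or.inr ⟨h, hs⟩
      · exact absurd h hn

-- B's sort with the tuple key is the single-key sort with pvKey
theorem pvSorted2_eq (ws : List String) :
    PySem.List.sorted2 ws PySem.Str.len (fun w => w) = PySem.List.sorted ws pvKey := by
  show ws.foldl (fun acc x => PySem.List.insertBy
      (fun a b : String => decide (PySem.Str.len a < PySem.Str.len b) ||
        (!decide (PySem.Str.len b < PySem.Str.len a) && decide (a < b))) x acc) [] =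
    ws.foldl (fun acc x => PySem.List.insertBy
      (fun a b : String => decide (pvKey a < pvKey b)) x acc) []
  have hbe : (fun a b : String => decide (PySem.Str.len a < PySem.Str.len b) ||
      (!decide (PySem.Str.len b < PySem.Str.len a) && decide (a < b))) =
      (fun a b : String => decide (pvKey a < pvKey b)) := by
    funext a b
    rw [← decide_not, ← Bool.decide_and, ← Bool.decide_or, decide_eq_decide]
    exact (pvKey_lt a b).symm
  rw [hbe]

-- in a pairwise-≤ list, the last element is a maximum
theorem pvLast_max (l : List String) (h : l ≠ [])
    (hp : l.Pairwise (fun a b => pvKey a ≤ pvKey b)) :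
    ∀ y ∈ l, pvKey y ≤ pvKey (l.getLast h) := by
  induction l with
  | nil => cases h rfl
  | cons x t ih =>
    intro y hy
    rcases List.pairwise_cons.mp hp with ⟨hx, ht⟩
    cases t with
    | nil => simp at hy; simp [hy, List.getLast]
    | cons z t' =>
      have hlast : (x :: z :: t').getLast h = (z :: t').getLast (by simp) := by
        simp [List.getLast]
      rw [hlast]
      rcases List.mem_cons.mp hy with rfl | hy
      · exact le_trans (hx z (by simp)) (ih (by simp) ht z (by simp))
      · exact ih (by simp) ht y hy

-- A's loop: the accumulator result is in the starting set and dominates every scanned word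
theorem pvFold_inv (ws : List String) (m : String) :
    (ws.foldl (fun maxWord word =>
      if PySem.Str.len word > PySem.Str.len maxWord then word
      else if PySem.Str.len word = PySem.Str.len maxWord ∧ maxWord < word then word
      else maxWord) m = m ∨
     ws.foldl (fun maxWord word =>
      if PySem.Str.len word > PySem.Str.len maxWord then word
      else if PySem.Str.len word = PySem.Str.len maxWord ∧ maxWord < word then word
      else maxWord) m ∈ ws) ∧
    pvKey m ≤ pvKey (ws.foldl (fun maxWord word =>
      if PySem.Str.len word > PySem.Str.len maxWord then word
      else if PySem.Str.len word = PySem.Str.len maxWord ∧ maxWord < word then word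
      else maxWord) m) ∧
    ∀ y ∈ ws, pvKey y ≤ pvKey (ws.foldl (fun maxWord word =>
      if PySem.Str.len word > PySem.Str.len maxWord then word
      else if PySem.Str.len word = PySem.Str.len maxWord ∧ maxWord < word then word
      else maxWord) m) := by
  induction ws generalizing m with
  | nil => simp
  | cons w t ih =>
    have hstep : ∀ m', pvKey m' ≤ pvKey (if PySem.Str.len w > PySem.Str.len m' then w
        else if PySem.Str.len w = PySem.Str.len m' ∧ m' < w then w else m') ∧
        pvKey w ≤ pvKey (if PySem.Str.len w > PySem.Str.len m' then w
        else if PySem.Str.len w = PySem.Str.len m' ∧ m' < w then w else m') := by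
      intro m'
      split_ifs with h1 h2
      · exact ⟨le_of_lt ((pvKey_lt m' w).mpr (Or.inl h1)), le_refl _⟩
      · exact ⟨le_of_lt ((pvKey_lt m' w).mpr (Or.inr ⟨by omega, h2.2⟩)), le_refl _⟩
      · refine ⟨le_refl _, ?_⟩
        by_contra hlt
        rcases (pvKey_lt m' w).mp (lt_of_not_ge hlt) with h | ⟨hn, hs⟩
        · exact h1 h
        · exact h2 ⟨by omega, hs⟩
    rcases ih ((if PySem.Str.len w > PySem.Str.len m then w
        else if PySem.Str.len w = PySem.Str.len m ∧ m < w then w else m)) with ⟨hmem, hle, hall⟩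
    refine ⟨?_, ?_, ?_⟩
    · simp only [List.foldl_cons]
      rcases hmem with h | h
      · rw [h]; split_ifs <;> simp_all
      · right; exact List.mem_cons_of_mem _ h
    · exact le_trans (hstep m).1 hle
    · intro y hy
      rcases List.mem_cons.mp hy with rfl | hy
      · exact le_trans (hstep m).2 hle
      · exact hall y hy

-- ===== VERDICT (by name: the statement is the Claim_ definition above) =====
theorem computeMaxWordLength1_spec : Claim_equal_computeMaxWordLength1 := by
  intro text _ hpre
  unfold Pre_computeMaxWordLength1 at hpre
  unfold Spec_computeMaxWordLength1
  simp only [computeMaxWordLength1, computeMaxWordLength1_alt, pvSorted2_eq]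
  set ws := PySem.Str.split₀ text with hws
  set s := PySem.List.sorted ws pvKey with hs
  have hsne : s ≠ [] := by
    intro h
    exact hpre ((PySem.List.sorted_eq_nil_iff ws pvKey false).mp h)
  have hwne : ws ≠ [] := hpre
  obtain ⟨w0, t, hwt⟩ := List.exists_cons_of_ne_nil hwne
  rw [hwt]
  rw [PySem.List.pyGet?_zero_cons, PySem.List.pyGet?_neg_one,
      List.getLast?_eq_some_getLast hsne]
  simp only
  -- A's result
  obtain ⟨hmemA, _, hallA⟩ := pvFold_inv (w0 :: t) w0
  set rA := (w0 :: t).foldl (fun maxWord word =>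
      if PySem.Str.len word > PySem.Str.len maxWord then word
      else if PySem.Str.len word = PySem.Str.len maxWord ∧ maxWord < word then word
      else maxWord) w0 with hrA
  have hAmem : rA ∈ ws := by
    rw [hwt]; rcases hmemA with h | h
    · rw [h]; exact List.mem_cons_self
    · exact h
  -- B's result
  set rB := s.getLast hsne with hrB
  have hBmem : rB ∈ ws := by
    have : rB ∈ s := List.getLast_mem hsne
    exact (PySem.List.sorted_perm ws pvKey false).mem_iff.mp this
  have hBall : ∀ y ∈ ws, pvKey y ≤ pvKey rB := by
    intro y hy
    have hys : y ∈ s := (PySem.List.sorted_perm ws pvKey false).mem_iff.mpr hy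
    exact pvLast_max s hsne (PySem.List.sorted_pairwise ws pvKey) y hys
  have h1 : pvKey rA ≤ pvKey rB := hBall rA hAmem
  have h2 : pvKey rB ≤ pvKey rA := by
    rw [hwt] at hBmem; exact hallA rB hBmem
  exact pvKey_inj (le_antisymm h1 h2)
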